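-- pv_equiv track=rewrite | github.com/bramucas/rem | rem/auxfunc.py | remove_subsumed
-- ===== SOURCE A (Python) =====
-- def remove_subsumed(complete_reason):  #function that removes the subsumed clauses
--
--
--
--     for i in range(0, len(complete_reason)):
--         for j in range(0, len(complete_reason)):
--             if complete_reason[i] == set():
--
--                 pass
--
--             elif complete_reason[i] == complete_reason[j] and i == j:
--
--                 pass
--
--             elif complete_reason[i] == complete_reason[j] and i != j:
--
--                 complete_reason[j] = set()
--
--             else:
--
--                 if complete_reason[i].issubset(complete_reason[j]):
--
--                     complete_reason[j] = set()
--
--     return [con for con in complete_reason if con != set()]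
-- ===== SOURCE B (Python) =====
-- # B: declarative one-pass filter by the closed-form "kept" characterization
-- # (nonempty, no nonempty proper subset anywhere, no equal clause earlier),
-- # instead of A's all-pairs sweep that progressively empties entries in place.
-- # NOTE: A mutates its argument (subsumed entries become set()); B does not --
-- # the equivalence claimed is about the return value only.
-- def remove_subsumed(complete_reason):
--     return [c for k, c in enumerate(complete_reason)
--             if c
--             and not any(d and d < c for d in complete_reason)
--             and all(d != c for d in complete_reason[:k])]
-- ===== Notes on version B (the rewrite author's own statement) =====
-- stated objective: alternative
-- what changed: A repeatedly mutates the list in an all-pairs sweep, emptying subsumed entries and letting later comparisons see the mutated state; B is a single declarative filter keeping each clause iff it is nonempty, has no nonempty proper subset anywhere in the list, and no equal clause appears earlier.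
import Mathlib
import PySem

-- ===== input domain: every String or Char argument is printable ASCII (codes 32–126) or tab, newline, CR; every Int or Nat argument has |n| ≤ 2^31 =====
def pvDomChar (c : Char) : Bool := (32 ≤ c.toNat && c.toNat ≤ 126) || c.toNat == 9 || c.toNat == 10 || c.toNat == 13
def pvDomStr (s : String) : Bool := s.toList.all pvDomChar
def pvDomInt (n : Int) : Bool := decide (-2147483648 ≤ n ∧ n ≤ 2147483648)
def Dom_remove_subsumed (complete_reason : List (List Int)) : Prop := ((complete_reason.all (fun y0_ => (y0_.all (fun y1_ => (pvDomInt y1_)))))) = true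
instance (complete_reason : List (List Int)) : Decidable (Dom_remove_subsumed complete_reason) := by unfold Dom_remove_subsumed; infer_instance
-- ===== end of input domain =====

-- B replaces A's in-place all-pairs sweep (which progressively empties subsumed entries)
-- by one declarative pass filtering with a closed-form "kept" test; objective: alternative.
-- A mutates its argument in place (subsumed entries become set()); B does not — the
-- equivalence proved here is about the return value only.

-- Python sets are modelled as lists of their elements; `==` and `issubset` on sets:

def pvSeteq (a b : List Int) : Bool := a.all (· ∈ b) && b.all (· ∈ a)
def pvSub (a b : List Int) : Bool := a.all (· ∈ b)

-- ===== PORT A =====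
-- the body of A's inner loop; indices i, j always come from range(0, len(complete_reason)),
-- so `complete_reason[i]` / `complete_reason[j]` are in range and getD is exact there
def pvIstep (i : Nat) (t : List (List Int)) (j : Nat) : List (List Int) :=
  let ci := t.getD i []
  let cj := t.getD j []
  if pvSeteq ci [] then t
  else if pvSeteq ci cj && i == j then t
  else if pvSeteq ci cj && !(i == j) then t.set j []
  else if pvSub ci cj then t.set j [] else t

def pvOstep (n : Nat) (s : List (List Int)) (i : Nat) : List (List Int) :=
  (List.range n).foldl (pvIstep i) s

def remove_subsumed (complete_reason : List (List Int)) : List (List Int) :=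
  let n := complete_reason.length
  (((List.range n).foldl (pvOstep n) complete_reason).filter (fun con => !pvSeteq con []))

-- ===== PORT B =====
def remove_subsumed_alt (complete_reason : List (List Int)) : List (List Int) :=
  ((PySem.List.enumerate complete_reason 0).filter (fun kc =>
      !kc.2.isEmpty
      && !(complete_reason.any (fun d => !d.isEmpty && (pvSub d kc.2 && !pvSeteq d kc.2)))
      && (PySem.List.slice complete_reason none (some kc.1)).all (fun d => !pvSeteq d kc.2))).map (·.2)

-- ===== PRECONDITION & SPEC =====
def Spec_remove_subsumed (complete_reason : List (List Int)) (out : List (List Int)) : Prop := out = remove_subsumed_alt complete_reason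
instance (complete_reason : List (List Int)) (out : List (List Int)) : Decidable (Spec_remove_subsumed complete_reason out) := by unfold Spec_remove_subsumed; infer_instance

-- ===== CLAIM (what is proved, stated in full; the proofs are below) =====
def Claim_equal_remove_subsumed : Prop := ∀ (complete_reason : List (List Int)), Dom_remove_subsumed complete_reason → Spec_remove_subsumed complete_reason (remove_subsumed complete_reason)

-- ===== LEMMAS AND PROOFS =====

theorem pvSub_of_seteq {a b : List Int} (h : pvSeteq a b = true) : pvSub a b = true := by
  simp [pvSeteq, pvSub] at *; exact h.1

def pvEcond (i : Nat) (ci : List Int) (j : Nat) (v : List Int) : Bool :=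
  !(pvSeteq ci []) && pvSub ci v && (!pvSeteq ci v || !(i == j))

theorem pvIstep_eq (i : Nat) (t : List (List Int)) (j : Nat) :
    pvIstep i t j = if pvEcond i (t.getD i []) j (t.getD j []) then t.set j [] else t := by
  cases h1 : pvSeteq (t.getD i []) [] <;>
  cases h2 : pvSeteq (t.getD i []) (t.getD j []) <;>
  cases h3 : (i == j) <;>
  cases h4 : pvSub (t.getD i []) (t.getD j []) <;>
    simp only [pvIstep, pvEcond, h1, h2, h3, h4, Bool.not_false, Bool.not_true,
      Bool.true_and, Bool.false_and, Bool.and_true, Bool.and_false, Bool.true_or,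
      Bool.false_or, Bool.or_true, Bool.or_false, if_true, if_false, ite_self] <;>
    first
      | rfl
      | exact absurd (pvSub_of_seteq h2) (by rw [h4]; simp)

theorem pvGetD_mapIdx (l : List (List Int)) (f : Nat → List Int → List Int) (k : Nat) :
    (l.mapIdx f).getD k [] = if k < l.length then f k (l.getD k []) else [] := by
  by_cases h : k < l.length
  · simp [List.getD_eq_getElem?_getD, h,
      List.getElem?_eq_getElem (show k < (l.mapIdx f).length by simpa using h),
      List.getElem_mapIdx]
  · simp [List.getD_eq_getElem?_getD, h,
      List.getElem?_eq_none (show (l.mapIdx f).length ≤ k by simpa using Nat.le_of_not_lt h)]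

theorem pvEcond_self_false (i : Nat) (ci : List Int) : pvEcond i ci i ci = false := by
  simp [pvEcond, pvSeteq, List.all_eq_true]

theorem pvInner_eq (i : Nat) (s : List (List Int)) (m : Nat) :
    (List.range m).foldl (pvIstep i) s =
      s.mapIdx (fun j v => if decide (j < m) && pvEcond i (s.getD i []) j v then [] else v) := by
  induction m with
  | zero =>
    simp only [List.range_zero, List.foldl_nil, Nat.not_lt_zero, decide_false, Bool.false_and,
      if_false]
    apply List.ext_getElem <;> simp
  | succ m ih =>
    rw [List.range_succ, List.foldl_append, ih, List.foldl_cons, List.foldl_nil, pvIstep_eq]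
    have ha : (s.mapIdx (fun j v => if decide (j < m) && pvEcond i (s.getD i []) j v then [] else v)).getD i [] = s.getD i [] := by
      rw [pvGetD_mapIdx]
      split
      · rw [pvEcond_self_false]; simp
      · next h =>
        rw [List.getD_eq_getElem?_getD, List.getElem?_eq_none (Nat.le_of_not_lt h)]; rfl
    have hb : (s.mapIdx (fun j v => if decide (j < m) && pvEcond i (s.getD i []) j v then [] else v)).getD m [] = s.getD m [] := by
      rw [pvGetD_mapIdx]
      split
      · simp
      · next h =>
        rw [List.getD_eq_getElem?_getD, List.getElem?_eq_none (Nat.le_of_not_lt h)]; rfl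
    rw [ha, hb]
    generalize s.getD i [] = ci
    apply List.ext_getElem?
    intro k
    rw [List.getElem?_mapIdx]
    by_cases hkm : m = k
    · subst hkm
      cases hsm : s[m]? with
      | none =>
        have hml : s.length ≤ m := List.getElem?_eq_none_iff.mp hsm
        split
        · rw [List.getElem?_set]
          simp [hsm, hml, List.getElem?_mapIdx]
        · simp [hsm, List.getElem?_mapIdx]
      | some x =>
        have hml : m < s.length := by
          rcases List.getElem?_eq_some_iff.mp hsm with ⟨h, -⟩; exact h
        have hx : s.getD m [] = x := by
          rw [List.getD_eq_getElem?_getD, hsm]; rfl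
        rw [hx]
        split
        · next hC =>
          rw [List.getElem?_set]
          simp [hsm, hml, hC, Nat.lt_succ_self]
        · next hC =>
          rw [List.getElem?_mapIdx]
          simp [hsm, hC, Nat.lt_irrefl, Nat.lt_succ_self]
    · have hmain : (s.mapIdx (fun j v => if decide (j < m) && pvEcond i ci j v then [] else v))[k]? =
          s[k]?.map (fun v => if decide (k < m + 1) && pvEcond i ci k v then [] else v) := by
        rw [List.getElem?_mapIdx]
        cases s[k]? with
        | none => rfl
        | some x =>
          have : (k < m) ↔ (k < m + 1) := by omega
          simp [this]
      split
      · rw [List.getElem?_set, if_neg hkm, hmain]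
      · rw [hmain]

def pvG (cr : List (List Int)) (k : Nat) : List Int := cr.getD k []

def pvAlive (cr : List (List Int)) : Nat → Bool
  | t => !(cr.getD t []).isEmpty &&
      ((List.range t).attach.all (fun t' => !pvAlive cr t'.1 || !pvSub (cr.getD t'.1 []) (cr.getD t [])))
  termination_by t => t
  decreasing_by exact List.mem_range.mp t'.2

def pvKilled (cr : List (List Int)) (i k : Nat) : Bool :=
  (List.range i).any (fun t => pvAlive cr t && (t != k) && pvSub (cr.getD t []) (cr.getD k []))

theorem pvAlive_iff (cr : List (List Int)) (t : Nat) :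
    pvAlive cr t = true ↔ (pvG cr t ≠ [] ∧
      ∀ t' < t, pvAlive cr t' = true → ¬ pvSub (pvG cr t') (pvG cr t) = true) := by
  rw [pvAlive]
  simp only [pvG, Bool.and_eq_true, Bool.not_eq_true', List.isEmpty_eq_false_iff,
    List.all_eq_true, List.mem_attach, Bool.or_eq_true, Bool.not_eq_true]
  refine and_congr_right fun _ => ⟨fun h t' ht' ha => ?_, fun h x _ => ?_⟩
  · rcases h ⟨t', List.mem_range.mpr ht'⟩ trivial with hc | hc
    · rw [ha] at hc; cases hc
    · exact hc
  · by_cases ha : pvAlive cr x.1 = true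
    · exact Or.inr (h x.1 (List.mem_range.mp x.2) ha)
    · exact Or.inl (by revert ha; cases pvAlive cr x.1 <;> simp)

theorem pvKilled_iff (cr : List (List Int)) (i k : Nat) :
    pvKilled cr i k = true ↔ ∃ t < i, pvAlive cr t = true ∧ t ≠ k ∧
      pvSub (pvG cr t) (pvG cr k) = true := by
  simp only [pvKilled, pvG, List.any_eq_true, List.mem_range, Bool.and_eq_true, bne_iff_ne]
  exact exists_congr fun t => by tauto

def pvStateAt (cr : List (List Int)) (i : Nat) : List (List Int) :=
  (List.range cr.length).map (fun k => if pvKilled cr i k then [] else pvG cr k)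

theorem pvKilled_succ (cr : List (List Int)) (i k : Nat) :
    pvKilled cr (i + 1) k =
      (pvKilled cr i k || (pvAlive cr i && (i != k) && pvSub (pvG cr i) (pvG cr k))) := by
  unfold pvKilled
  rw [List.range_succ, List.any_append]
  simp [pvG]

theorem pvAlive_eq (cr : List (List Int)) (i : Nat) :
    pvAlive cr i = (!(pvG cr i).isEmpty && !pvKilled cr i i) := by
  rw [Bool.eq_iff_iff]
  rw [pvAlive_iff]
  simp only [Bool.and_eq_true, Bool.not_eq_true', List.isEmpty_eq_false_iff]
  constructor
  · rintro ⟨h1, h2⟩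
    refine ⟨h1, ?_⟩
    rw [Bool.eq_false_iff]
    intro hk
    rcases (pvKilled_iff cr i i).mp hk with ⟨t, ht, ha, -, hs⟩
    exact h2 t ht ha hs
  · rintro ⟨h1, h2⟩
    refine ⟨h1, fun t' ht' ha hs => ?_⟩
    have hk : pvKilled cr i i = true := (pvKilled_iff cr i i).mpr ⟨t', ht', ha, by omega, hs⟩
    rw [hk] at h2; cases h2

theorem pvG_out (cr : List (List Int)) (k : Nat) (h : cr.length ≤ k) : pvG cr k = [] := by
  simp [pvG, List.getD_eq_getElem?_getD, List.getElem?_eq_none h]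

theorem pvStateAt_getElem? (cr : List (List Int)) (i k : Nat) :
    (pvStateAt cr i)[k]? = if k < cr.length then some (if pvKilled cr i k then [] else pvG cr k) else none := by
  by_cases h : k < cr.length
  · simp [pvStateAt, List.getElem?_map, List.getElem?_range, h]
  · simp [pvStateAt, List.getElem?_map, List.getElem?_range, h,
      List.getElem?_eq_none (show (List.range cr.length).length ≤ k by simpa using Nat.le_of_not_lt h)]

theorem pvStateAt_getD (cr : List (List Int)) (i k : Nat) :
    (pvStateAt cr i).getD k [] = if pvKilled cr i k then [] else pvG cr k := by
  rw [List.getD_eq_getElem?_getD, pvStateAt_getElem?]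
  split
  · rfl
  · next h =>
    rw [pvG_out cr k (Nat.le_of_not_lt h)]
    simp

theorem pvSub_nil_false (a : List Int) (h : a ≠ []) : pvSub a [] = false := by
  cases a with
  | nil => cases h rfl
  | cons x l => simp [pvSub]

theorem pvSub_iff (a b : List Int) : pvSub a b = true ↔ a.toFinset ⊆ b.toFinset := by
  simp [pvSub, List.all_eq_true, Finset.subset_iff]

theorem pvSeteq_iff (a b : List Int) : pvSeteq a b = true ↔ a.toFinset = b.toFinset := by
  simp only [pvSeteq, Bool.and_eq_true, List.all_eq_true, decide_eq_true_eq]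
  constructor
  · rintro ⟨h1, h2⟩
    apply Finset.ext
    intro x
    simp only [List.mem_toFinset]
    exact ⟨fun h => by simpa using h1 x (by simpa using h), fun h => by simpa using h2 x (by simpa using h)⟩
  · intro h
    constructor
    · intro x hx
      have : x ∈ a.toFinset := List.mem_toFinset.mpr (by simpa using hx)
      rw [h] at this
      simpa using List.mem_toFinset.mp this
    · intro x hx
      have : x ∈ b.toFinset := List.mem_toFinset.mpr (by simpa using hx)
      rw [← h] at this
      simpa using List.mem_toFinset.mp this

theorem pvSeteq_nil (a : List Int) : pvSeteq a [] = a.isEmpty := by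
  cases a <;> simp [pvSeteq]

theorem pvSeteq_refl (a : List Int) : pvSeteq a a = true := by
  simp [pvSeteq, List.all_eq_true]

theorem pvSeteq_false (a b : List Int) : pvSeteq a b = false ↔ a.toFinset ≠ b.toFinset := by
  rw [Bool.eq_false_iff, Ne, pvSeteq_iff]

theorem pvNonempty_of_seteq (a b : List Int) (h : pvSeteq a b = true) (hb : b ≠ []) : a ≠ [] := by
  intro ha
  subst ha
  rw [pvSeteq_iff] at h
  simp at h
  exact hb (List.toFinset_eq_empty_iff b |>.mp h.symm)

theorem pvOstep_state (cr : List (List Int)) (i : Nat) :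
    pvOstep cr.length (pvStateAt cr i) i = pvStateAt cr (i + 1) := by
  unfold pvOstep
  rw [pvInner_eq]
  rw [pvStateAt_getD]
  apply List.ext_getElem?
  intro k
  rw [List.getElem?_mapIdx, pvStateAt_getElem?, pvStateAt_getElem?]
  by_cases hk : k < cr.length
  · simp only [hk, if_true, Option.map_some]
    congr 1
    -- value-level identity at index k
    by_cases hai : pvAlive cr i = true
    · have hii : pvKilled cr i i = false := by
        have := pvAlive_eq cr i
        rw [hai] at this
        cases h : pvKilled cr i i
        · rfl
        · rw [h] at this; simp at this
      have hgi : pvG cr i ≠ [] := by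
        have := pvAlive_eq cr i
        rw [hai] at this
        cases hg : (pvG cr i).isEmpty
        · exact fun he => by rw [he] at hg; simp at hg
        · rw [hg] at this; simp at this
      rw [hii]
      simp only [Bool.false_eq_true, if_false]
      by_cases hkk : pvKilled cr i k = true
      · rw [if_pos hkk]
        have hc : pvEcond i (pvG cr i) k [] = false := by
          simp [pvEcond, pvSub_nil_false _ hgi]
        rw [hc]
        simp only [Bool.and_false, Bool.false_eq_true, if_false]
        rw [pvKilled_succ, hkk]
        simp
      · rw [if_neg hkk]
        rw [pvKilled_succ, Bool.eq_false_iff.mpr hkk, Bool.false_or, hai, Bool.true_and]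
        by_cases hik : i = k
        · subst hik
          have : pvEcond i (pvG cr i) i (pvG cr i) = false := pvEcond_self_false i (pvG cr i)
          rw [this]
          simp
        · have hne : (i != k) = true := by simp [hik]
          rw [hne, Bool.true_and]
          have hc : pvEcond i (pvG cr i) k (pvG cr k) = pvSub (pvG cr i) (pvG cr k) := by
            have h1 : pvSeteq (pvG cr i) [] = false := by
              rw [pvSeteq_nil]
              cases hg : (pvG cr i).isEmpty
              · rfl
              · exact absurd (List.isEmpty_iff.mp hg) hgi
            have h2 : (!(i == k)) = true := by simp [hik]
            rw [pvEcond, h1, h2]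
            cases pvSub (pvG cr i) (pvG cr k) <;> simp
          rw [hc]
          cases pvSub (pvG cr i) (pvG cr k) <;> simp [hk]
    · have hci : (if pvKilled cr i i = true then [] else pvG cr i) = [] := by
        have := pvAlive_eq cr i
        rw [Bool.eq_false_iff.mpr hai] at this
        cases h : pvKilled cr i i
        · rw [h] at this
          simp at this
          simp [this]
        · simp
      rw [hci]
      have hc : ∀ v, pvEcond i [] k v = false := by
        intro v; simp [pvEcond, pvSeteq]
      rw [hc]
      simp only [Bool.and_false, Bool.false_eq_true, if_false]
      rw [pvKilled_succ, Bool.eq_false_iff.mpr hai]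
      simp
  · simp [hk]

theorem pvOuter_eq (cr : List (List Int)) (i : Nat) :
    (List.range i).foldl (pvOstep cr.length) cr = pvStateAt cr i := by
  induction i with
  | zero =>
    apply List.ext_getElem?
    intro k
    rw [pvStateAt_getElem?]
    have hkill : pvKilled cr 0 k = false := by simp [pvKilled]
    rw [hkill]
    simp only [List.range_zero, List.foldl_nil, Bool.false_eq_true, if_false]
    by_cases hk : k < cr.length
    · rw [if_pos hk, List.getElem?_eq_getElem hk]
      rw [pvG, List.getD_eq_getElem?_getD, List.getElem?_eq_getElem hk]
      rfl
    · rw [if_neg hk, List.getElem?_eq_none (Nat.le_of_not_lt hk)]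
  | succ i ih =>
    rw [List.range_succ, List.foldl_append, ih, List.foldl_cons, List.foldl_nil, pvOstep_state]

theorem pvA_form (cr : List (List Int)) :
    remove_subsumed cr =
      ((List.range cr.length).filter
        (fun k => !(pvG cr k).isEmpty && !pvKilled cr cr.length k)).map (pvG cr) := by
  show ((List.range cr.length).foldl (pvOstep cr.length) cr).filter (fun con => !pvSeteq con []) = _
  rw [pvOuter_eq, pvStateAt, List.filter_map]
  have hpred : ∀ k ∈ List.range cr.length,
      ((fun con => !pvSeteq con []) ∘ (fun k => if pvKilled cr cr.length k then [] else pvG cr k)) k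
        = (fun k => !(pvG cr k).isEmpty && !pvKilled cr cr.length k) k := by
    intro k _
    simp only [Function.comp]
    cases hkk : pvKilled cr cr.length k
    · simp [pvSeteq_nil]
    · simp [pvSeteq_nil, pvSeteq]
  rw [List.filter_congr hpred]
  apply List.map_congr_left
  intro k hkmem
  have := List.mem_filter.mp hkmem
  rcases this with ⟨-, hp⟩
  have hkk : pvKilled cr cr.length k = false := by
    rcases Bool.and_eq_true _ _ |>.mp hp with ⟨-, h2⟩
    cases h : pvKilled cr cr.length k
    · rfl
    · rw [h] at h2; cases h2
  simp [hkk]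

theorem pvEnum_eq (cr : List (List Int)) :
    PySem.List.enumerate cr 0 = (List.range cr.length).map (fun (k : Nat) => ((k : Int), pvG cr k)) := by
  apply List.ext_getElem?
  intro k
  rw [PySem.List.getElem?_enumerate, List.getElem?_map]
  by_cases hk : k < cr.length
  · rw [List.getElem?_eq_getElem hk,
      List.getElem?_eq_getElem (show k < (List.range cr.length).length by simpa using hk)]
    simp [pvG, List.getD_eq_getElem?_getD, List.getElem?_eq_getElem hk]
  · rw [List.getElem?_eq_none (Nat.le_of_not_lt hk),
      List.getElem?_eq_none (show (List.range cr.length).length ≤ k by simpa using Nat.le_of_not_lt hk)]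
    rfl

def pvQ (cr : List (List Int)) (k : Nat) : Bool :=
  !(pvG cr k).isEmpty
  && !(cr.any (fun d => !d.isEmpty && (pvSub d (pvG cr k) && !pvSeteq d (pvG cr k))))
  && (cr.take k).all (fun d => !pvSeteq d (pvG cr k))

theorem pvB_form (cr : List (List Int)) :
    remove_subsumed_alt cr =
      ((List.range cr.length).filter (fun k => pvQ cr k)).map (pvG cr) := by
  unfold remove_subsumed_alt
  rw [pvEnum_eq, List.filter_map, List.map_map]
  have hpred : ∀ k ∈ List.range cr.length,
      ((fun kc : Int × List Int =>
          !kc.2.isEmpty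
          && !(cr.any (fun d => !d.isEmpty && (pvSub d kc.2 && !pvSeteq d kc.2)))
          && (PySem.List.slice cr none (some kc.1)).all (fun d => !pvSeteq d kc.2))
        ∘ (fun k : Nat => ((k : Int), pvG cr k))) k = pvQ cr k := by
    intro k _
    simp only [Function.comp, pvQ]
    rw [PySem.List.slice_to_natCast]
  rw [List.filter_congr hpred]
  rfl

theorem pvQ_iff (cr : List (List Int)) (k : Nat) : pvQ cr k = true ↔
    (pvG cr k ≠ [] ∧ (∀ d ∈ cr, ¬(d ≠ [] ∧ pvSub d (pvG cr k) = true ∧ pvSeteq d (pvG cr k) = false)) ∧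
      ∀ d ∈ cr.take k, pvSeteq d (pvG cr k) = false) := by
  simp only [pvQ, Bool.and_eq_true, Bool.not_eq_true', List.isEmpty_eq_false_iff,
    List.all_eq_true, List.any_eq_false, Bool.and_eq_false_iff, Bool.not_eq_false',
    List.isEmpty_iff, ne_eq]
  tauto

theorem pvKeptL_iff (cr : List (List Int)) (k : Nat) :
    (!(pvG cr k).isEmpty && !pvKilled cr cr.length k) = true ↔
      (pvG cr k ≠ [] ∧ ∀ t < cr.length,
        ¬(pvAlive cr t = true ∧ t ≠ k ∧ pvSub (pvG cr t) (pvG cr k) = true)) := by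
  simp only [Bool.and_eq_true, Bool.not_eq_true', List.isEmpty_eq_false_iff, ne_eq]
  constructor
  · rintro ⟨h1, h2⟩
    refine ⟨h1, fun t ht hcon => ?_⟩
    have : pvKilled cr cr.length k = true :=
      (pvKilled_iff cr cr.length k).mpr ⟨t, ht, hcon.1, hcon.2.1, hcon.2.2⟩
    rw [this] at h2; cases h2
  · rintro ⟨h1, h2⟩
    refine ⟨h1, ?_⟩
    rw [Bool.eq_false_iff]
    intro hkt
    rcases (pvKilled_iff cr cr.length k).mp hkt with ⟨t, ht, ha, hne, hs⟩
    exact h2 t ht ⟨ha, hne, hs⟩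

theorem pvIdx_mem (cr : List (List Int)) (m : Nat) (hm : m < cr.length) : pvG cr m ∈ cr := by
  rw [pvG, List.getD_eq_getElem?_getD, List.getElem?_eq_getElem hm]
  exact List.getElem_mem hm

theorem pvKept_iff_Q (cr : List (List Int)) (k : Nat) (hk : k < cr.length) :
    (!(pvG cr k).isEmpty && !pvKilled cr cr.length k) = pvQ cr k := by
  rw [Bool.eq_iff_iff, pvKeptL_iff, pvQ_iff]
  set n := cr.length with hn
  constructor
  · rintro ⟨hgk, hno⟩
    -- (a): no nonempty proper subset anywhere in the list
    have hA : ∀ m < n, pvG cr m ≠ [] → ¬(pvSub (pvG cr m) (pvG cr k) = true ∧ pvSeteq (pvG cr m) (pvG cr k) = false) := by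
      intro m hm hgm hcon
      obtain ⟨hsub, hneq⟩ := hcon
      classical
      have hs : ((Finset.range n).filter (fun t => pvG cr t ≠ [] ∧ pvSub (pvG cr t) (pvG cr k) = true ∧ pvSeteq (pvG cr t) (pvG cr k) = false)).Nonempty :=
        ⟨m, Finset.mem_filter.mpr ⟨Finset.mem_range.mpr hm, hgm, hsub, hneq⟩⟩
      obtain ⟨t0, ht0mem, ht0min⟩ :=
        Finset.exists_min_image _ (fun t => (pvG cr t).toFinset.card * n + t) hs
      obtain ⟨ht0r, hgt0, hsub0, hneq0⟩ :=
        (by simpa [Finset.mem_filter, Finset.mem_range] using ht0mem :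
          t0 < n ∧ pvG cr t0 ≠ [] ∧ pvSub (pvG cr t0) (pvG cr k) = true ∧ pvSeteq (pvG cr t0) (pvG cr k) = false)
      have halive : pvAlive cr t0 = true := by
        rw [pvAlive_iff]
        refine ⟨hgt0, fun t' ht' ha' hs' => ?_⟩
        have hgt' : pvG cr t' ≠ [] := ((pvAlive_iff cr t').mp ha').1
        have hsubk : pvSub (pvG cr t') (pvG cr k) = true := by
          rw [pvSub_iff] at hs' hsub0 ⊢
          exact Finset.Subset.trans hs' hsub0
        have hneqk : pvSeteq (pvG cr t') (pvG cr k) = false := by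
          cases h : pvSeteq (pvG cr t') (pvG cr k)
          · rfl
          · exfalso
            rw [pvSeteq_iff] at h
            rw [pvSub_iff] at hsub0 hs'
            have heq : (pvG cr t0).toFinset = (pvG cr k).toFinset :=
              Finset.Subset.antisymm hsub0 (h ▸ hs')
            rw [pvSeteq_false] at hneq0
            exact hneq0 heq
        have ht'S : t' ∈ (Finset.range n).filter (fun t => pvG cr t ≠ [] ∧ pvSub (pvG cr t) (pvG cr k) = true ∧ pvSeteq (pvG cr t) (pvG cr k) = false) :=
          Finset.mem_filter.mpr ⟨Finset.mem_range.mpr (by omega), hgt', hsubk, hneqk⟩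
        have hle := ht0min t' ht'S
        simp only at hle
        cases h : pvSeteq (pvG cr t') (pvG cr t0)
        · have hcard : (pvG cr t').toFinset.card < (pvG cr t0).toFinset.card := by
            apply Finset.card_lt_card
            rw [pvSub_iff] at hs'
            refine ⟨hs', fun hcon => ?_⟩
            rw [pvSeteq_false] at h
            exact h (Finset.Subset.antisymm hs' hcon)
          have hmul : ((pvG cr t').toFinset.card + 1) * n ≤ (pvG cr t0).toFinset.card * n :=
            Nat.mul_le_mul_right n (Nat.succ_le_of_lt hcard)
          rw [Nat.add_mul, Nat.one_mul] at hmul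
          omega
        · rw [pvSeteq_iff] at h
          rw [h] at hle
          omega
      have ht0k : t0 ≠ k := by
        intro hh; subst hh
        rw [pvSeteq_refl] at hneq0; cases hneq0
      exact hno t0 ht0r ⟨halive, ht0k, hsub0⟩
    refine ⟨hgk, ?_, ?_⟩
    · intro d hd hcon
      obtain ⟨m, hm, rfl⟩ := List.mem_iff_getElem.mp hd
      have hgm : pvG cr m = cr[m] := by
        rw [pvG, List.getD_eq_getElem?_getD, List.getElem?_eq_getElem hm]; rfl
      exact hA m hm (hgm ▸ hcon.1) ⟨hgm ▸ hcon.2.1, hgm ▸ hcon.2.2⟩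
    · intro d hd
      obtain ⟨j, hj, rfl⟩ := List.mem_iff_getElem.mp hd
      have hjk : j < k := by
        have : j < min k n := by simpa using hj
        omega
      have hval : (cr.take k)[j] = pvG cr j := by
        rw [List.getElem_take, pvG, List.getD_eq_getElem?_getD, List.getElem?_eq_getElem (by omega)]; rfl
      rw [hval]
      cases he : pvSeteq (pvG cr j) (pvG cr k)
      · rfl
      · exfalso
        classical
        have hex : ∃ j', j' < k ∧ pvSeteq (pvG cr j') (pvG cr k) = true := ⟨j, hjk, he⟩
        obtain ⟨hj0k, hj0eq⟩ := Nat.find_spec hex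
        have hg0 : pvG cr (Nat.find hex) ≠ [] := pvNonempty_of_seteq _ _ hj0eq hgk
        have halive0 : pvAlive cr (Nat.find hex) = true := by
          rw [pvAlive_iff]
          refine ⟨hg0, fun t' ht' ha' hs' => ?_⟩
          have hgt' : pvG cr t' ≠ [] := ((pvAlive_iff cr t').mp ha').1
          have hsubk : pvSub (pvG cr t') (pvG cr k) = true := by
            rw [pvSub_iff] at hs' ⊢
            rw [pvSeteq_iff] at hj0eq
            exact hj0eq ▸ hs'
          cases hcase : pvSeteq (pvG cr t') (pvG cr k)
          · exact hA t' (by omega) hgt' ⟨hsubk, hcase⟩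
          · exact Nat.find_min hex ht' ⟨by omega, hcase⟩
        refine hno (Nat.find hex) (by omega) ⟨halive0, by omega, ?_⟩
        rw [pvSub_iff]
        rw [pvSeteq_iff] at hj0eq
        rw [hj0eq]
  · rintro ⟨hgk, hnosub, hnodup⟩
    have hA : ∀ m < n, ¬(pvG cr m ≠ [] ∧ pvSub (pvG cr m) (pvG cr k) = true ∧ pvSeteq (pvG cr m) (pvG cr k) = false) :=
      fun m hm hcon => hnosub (pvG cr m) (pvIdx_mem cr m hm) hcon
    have hdup : ∀ j < k, pvSeteq (pvG cr j) (pvG cr k) = false := by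
      intro j hj
      have hval : (cr.take k)[j]'(by simp; omega) = pvG cr j := by
        rw [List.getElem_take, pvG, List.getD_eq_getElem?_getD, List.getElem?_eq_getElem (by omega)]; rfl
      have := hnodup ((cr.take k)[j]'(by simp; omega)) (List.getElem_mem _)
      rwa [hval] at this
    refine ⟨hgk, fun t ht hcon => ?_⟩
    obtain ⟨halivet, htk, hsubt⟩ := hcon
    have hgt : pvG cr t ≠ [] := ((pvAlive_iff cr t).mp halivet).1
    have hseq : pvSeteq (pvG cr t) (pvG cr k) = true := by
      cases h : pvSeteq (pvG cr t) (pvG cr k)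
      · exact absurd ⟨hgt, hsubt, h⟩ (hA t ht)
      · rfl
    rcases Nat.lt_or_ge t k with hlt | hge
    · rw [hdup t hlt] at hseq; cases hseq
    · have htk' : k < t := by omega
      have halivek : pvAlive cr k = true := by
        rw [pvAlive_iff]
        refine ⟨hgk, fun t' ht' ha' hs' => ?_⟩
        have hgt' : pvG cr t' ≠ [] := ((pvAlive_iff cr t').mp ha').1
        cases h : pvSeteq (pvG cr t') (pvG cr k)
        · exact absurd ⟨hgt', hs', h⟩ (hA t' (by omega))
        · rw [hdup t' ht'] at h; cases h
      have := ((pvAlive_iff cr t).mp halivet).2 k htk' halivek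
      apply this
      rw [pvSub_iff]
      rw [pvSeteq_iff] at hseq
      rw [hseq]

-- ===== VERDICT (by name: the statement is the Claim_ definition above) =====
theorem remove_subsumed_spec : Claim_equal_remove_subsumed := by
  intro cr _
  unfold Spec_remove_subsumed
  rw [pvA_form, pvB_form]
  congr 1
  apply List.filter_congr
  intro k hk
  exact pvKept_iff_Q cr k (List.mem_range.mp hk)
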